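-- pv_equiv track=rewrite | github.com/DO-NE/ProteomicsAgent | taxon/algorithms/ibaq_core/fasta_utils.py | count_tryptic_peptides
-- ===== SOURCE A (Python) =====
-- def count_tryptic_peptides(
--     seq: str,
--     min_len: int = 7,
--     max_len: int = 30,
--     missed_cleavages: int = 2,
-- ) -> int:
--     """Count theoretical tryptic peptides for a protein sequence.
--
--     Trypsin cleaves after K or R, except when followed by P.
--     """
--     if not seq:
--         return 0
--
--     sites = [0]
--     for i in range(len(seq) - 1):
--         if seq[i] in ("K", "R") and seq[i + 1] != "P":
--             sites.append(i + 1)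
--     sites.append(len(seq))
--
--     count = 0
--     max_jump = max(int(missed_cleavages), 0) + 1
--     for start in range(len(sites) - 1):
--         for end in range(start + 1, min(start + 1 + max_jump, len(sites))):
--             pep_len = sites[end] - sites[start]
--             if min_len <= pep_len <= max_len:
--                 count += 1
--     return count
-- ===== SOURCE B (Python) =====
-- def count_tryptic_peptides(
--     seq: str,
--     min_len: int = 7,
--     max_len: int = 30,
--     missed_cleavages: int = 2,
-- ) -> int:
--     """Count theoretical tryptic peptides in one streaming pass.
--
--     Instead of materialising the full cleavage-site list and running a nested
--     start/end loop over it, stream over the sequence keeping only the last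
--     max_jump boundary positions in a bounded buffer.
--     """
--     if not seq:
--         return 0
--     max_jump = max(int(missed_cleavages), 0) + 1
--     buf = [0]  # most recent boundary positions, at most max_jump of them
--     count = 0
--     for i in range(len(seq) - 1):
--         if seq[i] in "KR" and seq[i + 1] != "P":
--             s = i + 1
--             count += sum(1 for b in buf if min_len <= s - b <= max_len)
--             buf.append(s)
--             if len(buf) > max_jump:
--                 buf.pop(0)
--     n = len(seq)
--     count += sum(1 for b in buf if min_len <= n - b <= max_len)
--     return count
-- ===== Notes on version B (the rewrite author's own statement) =====
-- stated objective: alternative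
-- what changed: Replaces A's materialised cleavage-site list plus nested start/end window loops with a single streaming pass over the sequence that keeps only the last max_jump boundary positions in a bounded buffer and counts peptides as each new boundary is reached.
import Mathlib
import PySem

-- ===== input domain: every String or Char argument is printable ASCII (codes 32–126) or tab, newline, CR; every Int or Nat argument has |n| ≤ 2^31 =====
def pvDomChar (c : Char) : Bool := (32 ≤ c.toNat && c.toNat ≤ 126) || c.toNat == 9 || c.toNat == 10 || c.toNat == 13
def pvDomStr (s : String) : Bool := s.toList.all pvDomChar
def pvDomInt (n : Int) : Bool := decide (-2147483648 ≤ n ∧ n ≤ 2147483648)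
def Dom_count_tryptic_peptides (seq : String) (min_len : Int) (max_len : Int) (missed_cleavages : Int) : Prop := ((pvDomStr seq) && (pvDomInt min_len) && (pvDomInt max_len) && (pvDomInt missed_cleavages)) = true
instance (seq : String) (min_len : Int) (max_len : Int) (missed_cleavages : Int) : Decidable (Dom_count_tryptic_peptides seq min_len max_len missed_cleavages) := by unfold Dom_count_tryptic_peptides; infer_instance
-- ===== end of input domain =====

-- B is an alternative implementation: one streaming pass with a bounded buffer of the
-- last max_jump boundary positions instead of A's materialised site list + nested loops.

-- ===== PORT A =====
-- seq[i] in ("K","R") and seq[i+1] != "P"; indices are always in range, so getD is exact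
def pvCondA (chars : List Char) (i : Nat) : Bool :=
  (chars.getD i ' ' == 'K' || chars.getD i ' ' == 'R') && chars.getD (i + 1) ' ' != 'P'

-- sites = [0]; for i in range(len(seq)-1): if …: sites.append(i+1)
def pvSitesA (chars : List Char) : List Int :=
  (List.range (chars.length - 1)).foldl
    (fun acc i => if pvCondA chars i then acc ++ [(i : Int) + 1] else acc) [0]

def count_tryptic_peptides (seq : String) (min_len : Int) (max_len : Int) (missed_cleavages : Int) : Int :=
  let chars := seq.toList
  if chars.isEmpty then 0 else
  let sites := pvSitesA chars ++ [(chars.length : Int)]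
  let n := sites.length
  -- max_jump = max(int(missed_cleavages), 0) + 1; int() is identity on int,
  -- and max missed_cleavages 0 ≥ 0 so .toNat is exact
  let mj : Nat := (max missed_cleavages 0).toNat + 1
  (List.range (n - 1)).foldl
    (fun count start =>
      -- for end in range(start+1, min(start+1+max_jump, len(sites)))
      (List.range' (start + 1) (min (start + 1 + mj) n - (start + 1))).foldl
        (fun c e =>
          let pep := sites.getD e 0 - sites.getD start 0
          if min_len ≤ pep ∧ pep ≤ max_len then c + 1 else c)
        count)
    0

-- ===== PORT B =====
-- sum(1 for b in buf if min_len <= s - b <= max_len)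
def pvCountIn (lo hi s : Int) (buf : List Int) : Int :=
  ((buf.filter (fun b => decide (lo ≤ s - b) && decide (s - b ≤ hi))).length : Int)

-- buf.append(s); if len(buf) > max_jump: buf.pop(0)  — keeps the last mj elements
def pvPush (mj : Nat) (s : Int) (buf : List Int) : List Int :=
  let b := buf ++ [s]
  b.drop (b.length - mj)

-- the streaming for-loop: walk the characters with their index, looking one ahead
def pvStream (mj : Nat) (lo hi : Int) : List Char → Nat → List Int × Int → List Int × Int
  | [], _, st => st
  | [_], _, st => st
  | c :: c2 :: rest, i, (buf, cnt) =>
    if (c == 'K' || c == 'R') && c2 != 'P' then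
      pvStream mj lo hi (c2 :: rest) (i + 1)
        (pvPush mj ((i : Int) + 1) buf, cnt + pvCountIn lo hi ((i : Int) + 1) buf)
    else
      pvStream mj lo hi (c2 :: rest) (i + 1) (buf, cnt)

def count_tryptic_peptides_alt (seq : String) (min_len : Int) (max_len : Int) (missed_cleavages : Int) : Int :=
  let chars := seq.toList
  if chars.isEmpty then 0 else
  let mj : Nat := (max missed_cleavages 0).toNat + 1
  let st := pvStream mj min_len max_len chars 0 ([0], 0)
  st.2 + pvCountIn min_len max_len (chars.length : Int) st.1

-- ===== PRECONDITION & SPEC =====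
def Spec_count_tryptic_peptides (seq : String) (min_len : Int) (max_len : Int) (missed_cleavages : Int) (out : Int) : Prop := out = count_tryptic_peptides_alt seq min_len max_len missed_cleavages
instance (seq : String) (min_len : Int) (max_len : Int) (missed_cleavages : Int) (out : Int) : Decidable (Spec_count_tryptic_peptides seq min_len max_len missed_cleavages out) := by unfold Spec_count_tryptic_peptides; infer_instance

-- ===== CLAIM (what is proved, stated in full; the proofs are below) =====
def Claim_equal_count_tryptic_peptides : Prop := ∀ (seq : String) (min_len : Int) (max_len : Int) (missed_cleavages : Int), Dom_count_tryptic_peptides seq min_len max_len missed_cleavages → Spec_count_tryptic_peptides seq min_len max_len missed_cleavages (count_tryptic_peptides seq min_len max_len missed_cleavages)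

-- ===== LEMMAS AND PROOFS =====

-- the interior boundary positions, as B's stream discovers them
def pvBnds : List Char → Nat → List Int
  | [], _ => []
  | [_], _ => []
  | c :: c2 :: rest, i =>
    if (c == 'K' || c == 'R') && c2 != 'P' then ((i : Int) + 1) :: pvBnds (c2 :: rest) (i + 1)
    else pvBnds (c2 :: rest) (i + 1)

-- one step of B's stream, as a fold over the boundary list
def pvStep (mj : Nat) (lo hi : Int) (st : List Int × Int) (s : Int) : List Int × Int :=
  (pvPush mj s st.1, st.2 + pvCountIn lo hi s st.1)

-- indicator for a peptide between site indices s and e of the site list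
def pvInd (lo hi : Int) (sites : List Int) (s e : Nat) : Int :=
  if lo ≤ sites.getD e 0 - sites.getD s 0 ∧ sites.getD e 0 - sites.getD s 0 ≤ hi then 1 else 0

-- B's running count after processing a prefix l of the site list
def pvN (mj : Nat) (lo hi : Int) (l : List Int) : Int :=
  ∑ e ∈ Finset.range l.length, ∑ s ∈ Finset.Ico (e - mj) e, pvInd lo hi l s e

lemma pvStream_eq_fold (mj : Nat) (lo hi : Int) :
    ∀ (l : List Char) (i : Nat) (st : List Int × Int),
      pvStream mj lo hi l i st = (pvBnds l i).foldl (pvStep mj lo hi) st := by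
  intro l
  induction l with
  | nil => intro i st; simp [pvStream, pvBnds]
  | cons c rest ih =>
    intro i st
    cases rest with
    | nil => simp [pvStream, pvBnds]
    | cons c2 rest' =>
      obtain ⟨buf, cnt⟩ := st
      by_cases h : ((c == 'K' || c == 'R') && c2 != 'P') = true
      · simp only [pvStream, pvBnds, h, if_pos, List.foldl_cons, ih]
        rfl
      · simp only [pvStream, pvBnds, h, ih]
        simp

lemma pv_foldl_app_if {α β : Type} (p : α → Bool) (f : α → β) :
    ∀ (l : List α) (a : List β),
      l.foldl (fun acc x => if p x then acc ++ [f x] else acc) a = a ++ (l.filter p).map f := by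
  intro l
  induction l with
  | nil => intro a; simp
  | cons x t ih =>
    intro a
    by_cases h : p x = true
    · simp [h, ih]
    · simp [h, ih]

lemma pvBnds_spec :
    ∀ (cs : List Char) (i : Nat) (chars : List Char), chars.drop i = cs →
      pvBnds cs i
        = ((List.range' i (chars.length - 1 - i)).filter (pvCondA chars)).map
            (fun (j : Nat) => (j : Int) + 1) := by
  intro cs
  induction cs with
  | nil =>
    intro i chars h
    have : chars.length ≤ i := by
      have := congrArg List.length h
      simp at this; omega
    have : chars.length - 1 - i = 0 := by omega
    simp [pvBnds, this]
  | cons c cs' ih =>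
    intro i chars h
    have hlen : chars.length - i = cs'.length + 1 := by
      have := congrArg List.length h
      simp at this; omega
    cases cs' with
    | nil =>
      simp only [List.length_nil] at hlen
      have : chars.length - 1 - i = 0 := by omega
      simp [pvBnds, this]
    | cons c2 rest =>
      simp only [List.length_cons] at hlen
      have hk : chars.length - 1 - i = rest.length + 1 := by omega
      have hk2 : chars.length - 1 - (i + 1) = rest.length := by omega
      have hd1 : chars[i]? = some c := by
        have h0 : (chars.drop i)[0]? = some c := by rw [h]; rfl
        rw [List.getElem?_drop] at h0
        simpa using h0
      have hd2 : chars[i + 1]? = some c2 := by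
        have h0 : (chars.drop i)[1]? = some c2 := by rw [h]; rfl
        rwa [List.getElem?_drop] at h0
      have hdrop : chars.drop (i + 1) = c2 :: rest := by
        have : (chars.drop i).drop 1 = c2 :: rest := by rw [h]; rfl
        rwa [List.drop_drop] at this
      have hcond : pvCondA chars i = ((c == 'K' || c == 'R') && c2 != 'P') := by
        simp [pvCondA, List.getD, hd1, hd2]
      by_cases hc : ((c == 'K' || c == 'R') && c2 != 'P') = true
      · rw [hk, List.range'_succ, ← hk2, List.filter_cons, hcond, if_pos hc]
        simp [pvBnds, hc, ih (i + 1) chars hdrop]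
      · rw [hk, List.range'_succ, ← hk2, List.filter_cons, hcond, if_neg hc]
        simp [pvBnds, hc, ih (i + 1) chars hdrop]

lemma pvSitesA_eq (chars : List Char) : pvSitesA chars = 0 :: pvBnds chars 0 := by
  rw [pvSitesA, pv_foldl_app_if, pvBnds_spec chars 0 chars (by simp), List.range_eq_range']
  simp

lemma pv_getD_drop (l : List Int) (a j : Nat) : (l.drop a).getD j 0 = l.getD (a + j) 0 := by
  simp [List.getD, List.getElem?_drop]

lemma pv_getD_append_lt (l l' : List Int) (n : Nat) (h : n < l.length) :
    (l ++ l').getD n 0 = l.getD n 0 := by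
  simp [List.getD, List.getElem?_append_left h]

lemma pv_getD_append_self (l : List Int) (s : Int) : (l ++ [s]).getD l.length 0 = s := by
  simp [List.getD]

lemma pvCountIn_cons (lo hi s x : Int) (t : List Int) :
    pvCountIn lo hi s (x :: t)
      = (if lo ≤ s - x ∧ s - x ≤ hi then 1 else 0) + pvCountIn lo hi s t := by
  unfold pvCountIn
  rw [List.filter_cons]
  by_cases h : (decide (lo ≤ s - x) && decide (s - x ≤ hi)) = true
  · rw [if_pos h, if_pos (by simpa using h)]
    simp only [List.length_cons]
    push_cast
    ring
  · rw [if_neg h, if_neg (by simpa using h)]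
    simp

lemma pvCountIn_sum (lo hi s : Int) :
    ∀ (t : List Int),
      pvCountIn lo hi s t
        = ∑ j ∈ Finset.range t.length,
            (if lo ≤ s - t.getD j 0 ∧ s - t.getD j 0 ≤ hi then (1 : Int) else 0) := by
  intro t
  induction t with
  | nil => simp [pvCountIn]
  | cons x t ih =>
    rw [pvCountIn_cons, ih, List.length_cons, Finset.sum_range_succ']
    simp [add_comm]

lemma pvCountIn_drop (lo hi s : Int) (l : List Int) (mj : Nat) :
    pvCountIn lo hi s (l.drop (l.length - mj))
      = ∑ j ∈ Finset.Ico (l.length - mj) l.length,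
          (if lo ≤ s - l.getD j 0 ∧ s - l.getD j 0 ≤ hi then (1 : Int) else 0) := by
  rw [pvCountIn_sum, Finset.sum_Ico_eq_sum_range, List.length_drop]
  exact Finset.sum_congr rfl fun j _ => by rw [pv_getD_drop]

lemma pvPush_drop (mj : Nat) (hmj : 1 ≤ mj) (s : Int) (l : List Int) :
    pvPush mj s (l.drop (l.length - mj)) = (l ++ [s]).drop ((l ++ [s]).length - mj) := by
  unfold pvPush
  simp only [List.length_append, List.length_cons, List.length_nil, List.length_drop]
  by_cases hL : l.length ≤ mj
  · have e1 : l.length - mj = 0 := by omega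
    simp [e1]
  · have e2 : l.length - (l.length - mj) = mj := by omega
    rw [e2]
    have e3 : mj + 1 - mj = 1 := by omega
    rw [e3]
    rw [List.drop_append_of_le_length (by rw [List.length_drop]; omega),
      List.drop_append_of_le_length (by omega), List.drop_drop]
    congr 2
    omega

lemma pvB_invariant (mj : Nat) (lo hi : Int) (hmj : 1 ≤ mj) :
    ∀ (l : List Int),
      l.foldl (pvStep mj lo hi) ([], 0) = (l.drop (l.length - mj), pvN mj lo hi l) := by
  intro l
  induction l using List.reverseRecOn with
  | nil => simp [pvN]
  | append_singleton l s ih =>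
    rw [List.foldl_append, ih, List.foldl_cons, List.foldl_nil]
    unfold pvStep
    rw [pvPush_drop mj hmj]
    have h2 : pvN mj lo hi l + pvCountIn lo hi s (l.drop (l.length - mj))
        = pvN mj lo hi (l ++ [s]) := by
      unfold pvN
      rw [List.length_append, List.length_cons, List.length_nil, Finset.sum_range_succ]
      congr 1
      · exact Finset.sum_congr rfl fun e he =>
          Finset.sum_congr rfl fun j hj => by
            rw [Finset.mem_range] at he
            rw [Finset.mem_Ico] at hj
            unfold pvInd
            rw [pv_getD_append_lt l [s] e he, pv_getD_append_lt l [s] j (by omega)]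
      · rw [pvCountIn_drop]
        exact Finset.sum_congr rfl fun j hj => by
          rw [Finset.mem_Ico] at hj
          unfold pvInd
          rw [pv_getD_append_self, pv_getD_append_lt l [s] j (by omega)]
    rw [h2]

lemma pv_foldl_add (g : Nat → Int) :
    ∀ (L : List Nat) (c0 : Int), L.foldl (fun c x => c + g x) c0 = c0 + (L.map g).sum := by
  intro L
  induction L with
  | nil => intro c0; simp
  | cons x t ih => intro c0; simp [ih, add_assoc]

lemma pv_map_sum_range' (g : Nat → Int) :
    ∀ (k a : Nat), ((List.range' a k).map g).sum = ∑ j ∈ Finset.range k, g (a + j) := by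
  intro k
  induction k with
  | zero => intro a; simp
  | succ k ih =>
    intro a
    rw [List.range'_succ, List.map_cons, List.sum_cons, ih (a + 1), Finset.sum_range_succ']
    simp only [Nat.add_zero]
    rw [add_comm]
    congr 1
    exact Finset.sum_congr rfl fun j _ => by congr 1; omega

lemma pvA_sum (lo hi : Int) (sites : List Int) (mj : Nat) :
    (List.range (sites.length - 1)).foldl
      (fun count start =>
        (List.range' (start + 1) (min (start + 1 + mj) sites.length - (start + 1))).foldl
          (fun c e =>
            if lo ≤ sites.getD e 0 - sites.getD start 0 ∧
                sites.getD e 0 - sites.getD start 0 ≤ hi then c + 1 else c)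
          count)
      0
    = ∑ s ∈ Finset.range (sites.length - 1),
        ∑ e ∈ Finset.Ico (s + 1) (min (s + 1 + mj) sites.length), pvInd lo hi sites s e := by
  have hout : (fun (count : Int) (start : Nat) =>
      (List.range' (start + 1) (min (start + 1 + mj) sites.length - (start + 1))).foldl
        (fun c e =>
          if lo ≤ sites.getD e 0 - sites.getD start 0 ∧
              sites.getD e 0 - sites.getD start 0 ≤ hi then c + 1 else c)
        count)
      = fun count start => count +
          ∑ e ∈ Finset.Ico (start + 1) (min (start + 1 + mj) sites.length),
            pvInd lo hi sites start e := by
    funext count start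
    have hfun : (fun (c : Int) (e : Nat) =>
        if lo ≤ sites.getD e 0 - sites.getD start 0 ∧
            sites.getD e 0 - sites.getD start 0 ≤ hi then c + 1 else c)
        = fun c e => c + pvInd lo hi sites start e := by
      funext c e
      simp only [pvInd]
      split_ifs <;> simp
    rw [hfun, pv_foldl_add, pv_map_sum_range', Finset.sum_Ico_eq_sum_range]
  rw [hout, pv_foldl_add, List.range_eq_range', pv_map_sum_range']
  simp

lemma pvSwap (f : Nat → Nat → Int) (n mj : Nat) :
    ∑ s ∈ Finset.range (n - 1), ∑ e ∈ Finset.Ico (s + 1) (min (s + 1 + mj) n), f s e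
    = ∑ e ∈ Finset.range n, ∑ s ∈ Finset.Ico (e - mj) e, f s e := by
  calc
    ∑ s ∈ Finset.range (n - 1), ∑ e ∈ Finset.Ico (s + 1) (min (s + 1 + mj) n), f s e
      = ∑ s ∈ Finset.range (n - 1), ∑ e ∈ Finset.range n,
          if s + 1 ≤ e ∧ e < s + 1 + mj then f s e else 0 := by
        refine Finset.sum_congr rfl fun s _ => ?_
        have h1 : Finset.Ico (s + 1) (min (s + 1 + mj) n)
            = (Finset.range n).filter (fun e => s + 1 ≤ e ∧ e < s + 1 + mj) := by
          ext e
          simp only [Finset.mem_Ico, Finset.mem_filter, Finset.mem_range]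
          omega
        rw [h1, Finset.sum_filter]
    _ = ∑ s ∈ Finset.range n, ∑ e ∈ Finset.range n,
          if s + 1 ≤ e ∧ e < s + 1 + mj then f s e else 0 := by
        cases n with
        | zero => simp
        | succ m =>
          rw [Finset.sum_range_succ, Nat.succ_sub_one]
          have hz : ∑ e ∈ Finset.range (m + 1),
              (if m + 1 ≤ e ∧ e < m + 1 + mj then f m e else 0) = 0 :=
            Finset.sum_eq_zero fun e he => by
              rw [Finset.mem_range] at he
              rw [if_neg (by omega)]
          rw [hz, add_zero]
    _ = ∑ e ∈ Finset.range n, ∑ s ∈ Finset.range n,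
          if s + 1 ≤ e ∧ e < s + 1 + mj then f s e else 0 := Finset.sum_comm
    _ = ∑ e ∈ Finset.range n, ∑ s ∈ Finset.Ico (e - mj) e, f s e := by
        refine Finset.sum_congr rfl fun e he => ?_
        rw [Finset.mem_range] at he
        have h2 : (Finset.range n).filter (fun s => s + 1 ≤ e ∧ e < s + 1 + mj)
            = Finset.Ico (e - mj) e := by
          ext s
          simp only [Finset.mem_Ico, Finset.mem_filter, Finset.mem_range]
          omega
        rw [← Finset.sum_filter, h2]

lemma pvStep0 (mj : Nat) (hmj : 1 ≤ mj) (lo hi : Int) :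
    pvStep mj lo hi ([], 0) 0 = ([0], 0) := by
  have h1 : 1 - mj = 0 := by omega
  simp [pvStep, pvPush, pvCountIn, h1]

-- ===== VERDICT (by name: the statement is the Claim_ definition above) =====
theorem count_tryptic_peptides_spec : Claim_equal_count_tryptic_peptides := by
  intro seq lo hi mc _dom
  unfold Spec_count_tryptic_peptides
  by_cases hem : seq.toList.isEmpty = true
  · simp only [count_tryptic_peptides, count_tryptic_peptides_alt, if_pos hem]
  · simp only [count_tryptic_peptides, count_tryptic_peptides_alt, if_neg hem]
    have hmj : 1 ≤ (max mc 0).toNat + 1 := Nat.le_add_left 1 _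
    rw [pvSitesA_eq, pvStream_eq_fold,
      pvA_sum lo hi ((0 :: pvBnds seq.toList 0) ++ [(seq.toList.length : Int)])
        ((max mc 0).toNat + 1),
      pvSwap]
    have h1 := pvB_invariant ((max mc 0).toNat + 1) lo hi hmj
      ((0 :: pvBnds seq.toList 0) ++ [(seq.toList.length : Int)])
    simp only [List.foldl_append, List.foldl_cons, List.foldl_nil] at h1
    rw [pvStep0 _ hmj] at h1
    have h2 := congrArg Prod.snd h1
    simp only [pvStep] at h2
    rw [h2, pvN]
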